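-- pv_equiv track=rewrite | github.com/Vipin-Baniya/KalaOS | backend/kalacore/kalacraft.py | _rough_phonemes
-- ===== SOURCE A (Python) =====
-- from typing import List, Dict, Any, Tuple
--
-- _DIGRAPHS = ("th", "sh", "ch", "ph", "wh", "gh", "ng", "ck", "qu")
--
-- def _rough_phonemes(word: str) -> List[str]:
--     """
--     Heuristic phoneme tokenisation.  Not IPA — but good enough for stress
--     pattern visualisation.
--     """
--     w = word.lower().strip(".,!?;:'\"")
--     if not w:
--         return []
--
--     tokens: List[str] = []
--     i = 0
--     while i < len(w):
--         # Check digraph first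
--         if i + 1 < len(w) and w[i : i + 2] in _DIGRAPHS:
--             tokens.append(w[i : i + 2])
--             i += 2
--         elif w[i] in "aeiouy":
--             # Gather full vowel cluster
--             j = i + 1
--             while j < len(w) and w[j] in "aeiouy":
--                 j += 1
--             tokens.append(w[i:j])
--             i = j
--         else:
--             tokens.append(w[i])
--             i += 1
--     return tokens
-- ===== SOURCE B (Python) =====
-- _DIGRAPHS = ("th", "sh", "ch", "ph", "wh", "gh", "ng", "ck", "qu")
--
-- def _rough_phonemes(word):
--     """Suffix-consuming tokeniser: repeatedly cut a digraph, a vowel run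
--     (via lstrip) or a single character off the front of the string."""
--     w = word.lower().strip(".,!?;:'\"")
--     tokens = []
--     while w:
--         if w[:2] in _DIGRAPHS:
--             cut = 2
--         else:
--             cut = max(len(w) - len(w.lstrip("aeiouy")), 1)
--         tokens.append(w[:cut])
--         w = w[cut:]
--     return tokens
-- ===== Notes on version B (the rewrite author's own statement) =====
-- stated objective: alternative
-- what changed: Replaced the index-based while loop with inner vowel-gathering loop by a suffix-consuming tokeniser that repeatedly cuts one token (digraph / vowel run found via lstrip / single char) off the front of the remaining string.
import Mathlib
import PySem

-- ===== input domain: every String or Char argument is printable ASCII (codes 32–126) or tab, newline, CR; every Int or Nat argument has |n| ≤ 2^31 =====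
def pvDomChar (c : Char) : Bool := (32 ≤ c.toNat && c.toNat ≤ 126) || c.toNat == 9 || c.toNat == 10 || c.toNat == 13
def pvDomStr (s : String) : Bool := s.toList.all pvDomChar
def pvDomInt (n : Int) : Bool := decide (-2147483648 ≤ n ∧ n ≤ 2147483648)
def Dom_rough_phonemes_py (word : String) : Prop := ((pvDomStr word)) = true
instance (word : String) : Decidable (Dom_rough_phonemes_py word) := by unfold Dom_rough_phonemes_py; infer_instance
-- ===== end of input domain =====

-- B rewrites A's index loop (with inner vowel-gathering loop) as a suffix-consuming
-- tokeniser that cuts one token off the front per step; objective: alternative (same cost).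

-- shared constants: the digraph tuple and the vowel test 'c in "aeiouy"'
def pvDigraphs : List (List Char) :=
  [['t','h'], ['s','h'], ['c','h'], ['p','h'], ['w','h'], ['g','h'], ['n','g'], ['c','k'], ['q','u']]

def pvVowel (c : Char) : Bool :=
  c = 'a' || c = 'e' || c = 'i' || c = 'o' || c = 'u' || c = 'y'

-- ===== PORT A =====
-- inner 'while j < len(w) and w[j] in "aeiouy": j += 1'
def rp_gather (w : List Char) (j : Nat) : Nat :=
  if h : j < w.length then
    if pvVowel w[j] then rp_gather w (j + 1) else j
  else j
termination_by w.length - j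

-- used by rp_loop's termination (the vowel branch advances to rp_gather w (i+1) ≥ i+1)
theorem rp_gather_ge (w : List Char) (j : Nat) : j ≤ rp_gather w j := by
  rw [rp_gather]
  split
  · split
    · have := rp_gather_ge w (j + 1); omega
    · exact le_refl j
  · exact le_refl j
termination_by w.length - j

-- the 'while i < len(w)' loop; w[i:i+2] and w[i:j] ported as drop/take (exact: 0 ≤ i ≤ j, Python slices clamp like take)
def rp_loop (w : List Char) (i : Nat) : List String :=
  if h : i < w.length then
    if i + 1 < w.length ∧ (w.drop i).take 2 ∈ pvDigraphs then
      String.ofList ((w.drop i).take 2) :: rp_loop w (i + 2)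
    else if pvVowel w[i] then
      let j := rp_gather w (i + 1)
      String.ofList ((w.drop i).take (j - i)) :: rp_loop w j
    else
      String.ofList [w[i]] :: rp_loop w (i + 1)
  else []
termination_by w.length - i
decreasing_by
  · omega
  · have := rp_gather_ge w (i + 1); omega
  · omega

def rough_phonemes_py (word : String) : List String :=
  let w := PySem.Chars.stripChars (PySem.Chars.lower word.toList) ".,!?;:'\"".toList
  if w = [] then [] else rp_loop w 0

-- ===== PORT B =====
-- Source B's cut computation: 2 on a leading digraph, else max(cluster, 1); w.lstrip("aeiouy")
-- ported as dropWhile pvVowel (exact for a char-set argument); w[:cut]/w[cut:] = take/drop.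
def rp_cut (w : List Char) : Nat :=
  if w.take 2 ∈ pvDigraphs then 2
  else max (w.length - (w.dropWhile pvVowel).length) 1

-- used by rp_alt's termination
theorem rp_cut_pos (w : List Char) : 1 ≤ rp_cut w := by
  unfold rp_cut; split
  · omega
  · exact Nat.le_max_right _ 1

-- Source B's while loop, consuming the front of the remaining string
def rp_alt (w : List Char) : List String :=
  if hw : w = [] then []
  else
    String.ofList (w.take (rp_cut w)) :: rp_alt (w.drop (rp_cut w))
termination_by w.length
decreasing_by
  have hlen : 0 < w.length := List.length_pos_of_ne_nil hw
  have := rp_cut_pos w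
  simp only [List.length_drop]; omega

def rough_phonemes_py_alt (word : String) : List String :=
  let w := PySem.Chars.stripChars (PySem.Chars.lower word.toList) ".,!?;:'\"".toList
  rp_alt w

-- ===== PRECONDITION & SPEC =====
def Spec_rough_phonemes_py (word : String) (out : List String) : Prop := out = rough_phonemes_py_alt word
instance (word : String) (out : List String) : Decidable (Spec_rough_phonemes_py word out) := by unfold Spec_rough_phonemes_py; infer_instance

-- ===== CLAIM (what is proved, stated in full; the proofs are below) =====
def Claim_equal_rough_phonemes_py : Prop := ∀ (word : String), Dom_rough_phonemes_py word → Spec_rough_phonemes_py word (rough_phonemes_py word)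

-- ===== LEMMAS AND PROOFS =====

theorem mem_pvDigraphs_length {t : List Char} (ht : t ∈ pvDigraphs) : t.length = 2 := by
  fin_cases ht <;> rfl

-- A's inner while ends at the start index plus the length of the vowel cluster
theorem rp_gather_eq (w : List Char) (j : Nat) :
    rp_gather w j = j + ((w.drop j).takeWhile pvVowel).length := by
  rw [rp_gather]
  split
  · rename_i h
    split
    · rename_i hv
      rw [rp_gather_eq w (j + 1), List.drop_eq_getElem_cons h, List.takeWhile_cons]
      simp only [hv, if_true, List.length_cons]
      omega
    · rename_i hv
      rw [List.drop_eq_getElem_cons h, List.takeWhile_cons]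
      simp [hv]
  · rename_i h
    rw [List.drop_of_length_le (by omega)]
    simp
termination_by w.length - j

-- the main invariant: A's loop from index i computes B's tokenisation of the suffix
theorem rp_loop_eq_rp_alt (w : List Char) (i : Nat) :
    rp_loop w i = rp_alt (w.drop i) := by
  rw [rp_loop, rp_alt]
  by_cases h : i < w.length
  · have hne : w.drop i ≠ [] := by
      simp only [ne_eq, List.drop_eq_nil_iff]; omega
    simp only [h, dif_pos, hne, dif_neg, not_false_iff]
    by_cases hd : (w.drop i).take 2 ∈ pvDigraphs
    · -- digraph branch
      have hlen2 : i + 2 ≤ w.length := by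
        have h2 := mem_pvDigraphs_length hd
        simp only [List.length_take, List.length_drop] at h2
        omega
      have hcut : rp_cut (w.drop i) = 2 := by unfold rp_cut; simp [hd]
      have hcond : i + 1 < w.length ∧ (w.drop i).take 2 ∈ pvDigraphs := ⟨by omega, hd⟩
      simp only [if_pos hcond, hcut]
      rw [rp_loop_eq_rp_alt w (i + 2), List.drop_drop]
    · -- no digraph: A's first condition is false too
      have hcond : ¬ (i + 1 < w.length ∧ (w.drop i).take 2 ∈ pvDigraphs) := by
        intro hc; exact hd hc.2
      simp only [if_neg hcond]
      have hdrop : w.drop i = w[i] :: w.drop (i + 1) := List.drop_eq_getElem_cons h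
      by_cases hv : pvVowel w[i] = true
      · -- vowel cluster branch
        have htw : (w.drop i).takeWhile pvVowel = w[i] :: ((w.drop (i + 1)).takeWhile pvVowel) := by
          rw [hdrop, List.takeWhile_cons]; simp [hv]
        have hdw : (w.drop i).dropWhile pvVowel = (w.drop (i + 1)).dropWhile pvVowel := by
          rw [hdrop, List.dropWhile_cons]; simp [hv]
        have hsplit : ((w.drop i).takeWhile pvVowel).length + ((w.drop i).dropWhile pvVowel).length
            = (w.drop i).length := by
          rw [← List.length_append, List.takeWhile_append_dropWhile]
        rw [htw, hdw] at hsplit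
        simp only [List.length_cons] at hsplit
        have hcut : rp_cut (w.drop i) = 1 + ((w.drop (i + 1)).takeWhile pvVowel).length := by
          unfold rp_cut
          rw [if_neg hd, hdw]
          omega
        have hj : rp_gather w (i + 1) = (i + 1) + ((w.drop (i + 1)).takeWhile pvVowel).length :=
          rp_gather_eq w (i + 1)
        have hji : rp_gather w (i + 1) - i = rp_cut (w.drop i) := by rw [hcut]; omega
        simp only [if_pos hv, hji]
        rw [rp_loop_eq_rp_alt w (rp_gather w (i + 1)), List.drop_drop,
          show i + rp_cut (w.drop i) = rp_gather w (i + 1) by rw [hj, hcut]; omega]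
      · -- single-character branch
        have hdw : (w.drop i).dropWhile pvVowel = w.drop i := by
          rw [hdrop, List.dropWhile_cons]
          simp [hv, ← hdrop]
        have hcut : rp_cut (w.drop i) = 1 := by
          unfold rp_cut; rw [if_neg hd, hdw]; omega
        simp only [if_neg hv, hcut]
        rw [rp_loop_eq_rp_alt w (i + 1), List.drop_drop]
        rw [hdrop, List.take_succ_cons, List.take_zero]
  · have hnil : w.drop i = [] := List.drop_of_length_le (by omega)
    simp [h, hnil]
termination_by w.length - i
decreasing_by
  all_goals omega

-- ===== VERDICT (by name: the statement is the Claim_ definition above) =====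
theorem rough_phonemes_py_spec : Claim_equal_rough_phonemes_py := by
  intro word _
  unfold Spec_rough_phonemes_py rough_phonemes_py rough_phonemes_py_alt
  set w := PySem.Chars.stripChars (PySem.Chars.lower word.toList) ".,!?;:'\"".toList
  by_cases hnil : w = []
  · rw [if_pos hnil, hnil, rp_alt]; simp
  · rw [if_neg hnil, rp_loop_eq_rp_alt w 0, List.drop_zero]
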